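-- pv_equiv track=rewrite | github.com/KG-97/supptracker | backend/synonyms.py | _is_numeric_comma
-- ===== SOURCE A (Python) =====
-- def _is_numeric_comma(text: str, index: int) -> bool:
--     prev = index - 1
--     while prev >= 0 and text[prev].isspace():
--         prev -= 1
--     nxt = index + 1
--     length = len(text)
--     while nxt < length and text[nxt].isspace():
--         nxt += 1
--     return prev >= 0 and nxt < length and text[prev].isdigit() and text[nxt].isdigit()
-- ===== SOURCE B (Python) =====
-- def _is_numeric_comma(text: str, index: int) -> bool:
--     if index < 0:
--         return False
--     left = text[:index].rstrip()
--     right = text[index + 1:].lstrip()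
--     return bool(left) and bool(right) and left[-1].isdigit() and right[0].isdigit()
-- ===== Notes on version B (the rewrite author's own statement) =====
-- stated objective: simpler
-- what changed: Replaces A's two index-walking while-loops with slicing the string at the comma, stripping the adjacent whitespace with rstrip/lstrip, and testing the two boundary characters.
import Mathlib
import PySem

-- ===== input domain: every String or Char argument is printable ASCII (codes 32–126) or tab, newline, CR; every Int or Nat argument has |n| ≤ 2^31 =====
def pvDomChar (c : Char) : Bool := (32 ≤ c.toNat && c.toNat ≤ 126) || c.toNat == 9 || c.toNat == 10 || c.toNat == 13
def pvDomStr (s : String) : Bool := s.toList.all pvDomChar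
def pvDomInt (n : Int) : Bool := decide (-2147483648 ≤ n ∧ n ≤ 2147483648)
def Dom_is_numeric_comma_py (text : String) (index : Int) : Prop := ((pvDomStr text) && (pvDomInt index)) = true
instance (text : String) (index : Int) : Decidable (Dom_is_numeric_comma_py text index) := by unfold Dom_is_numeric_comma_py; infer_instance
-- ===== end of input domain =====

-- B replaces A's two index-walking while-loops by slicing the string at the comma and
-- stripping whitespace (rstrip/lstrip), then inspecting the boundary characters (objective: simpler).

-- ===== PORT A =====
-- while prev >= 0 and text[prev].isspace(): prev -= 1
def aScanPrev (text : List Char) (prev : Int) : Int :=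
  if h : 0 ≤ prev ∧ (PySem.List.pyGet? text prev).elim false PySem.Chars.isspace = true then
    aScanPrev text (prev - 1)
  else prev
termination_by (prev + 1).toNat
decreasing_by omega

-- while nxt < length and text[nxt].isspace(): nxt += 1
def aScanNext (text : List Char) (nxt : Int) : Int :=
  if h : nxt < (text.length : Int) ∧ (PySem.List.pyGet? text nxt).elim false PySem.Chars.isspace = true then
    aScanNext text (nxt + 1)
  else nxt
termination_by ((text.length : Int) - nxt).toNat
decreasing_by omega

def is_numeric_comma_py (text : String) (index : Int) : Bool :=
  let cs := text.toList
  let prev := aScanPrev cs (index - 1)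
  let nxt := aScanNext cs (index + 1)
  decide (0 ≤ prev) && decide (nxt < (cs.length : Int)) &&
    (PySem.List.pyGet? cs prev).elim false PySem.Chars.isdigit &&
    (PySem.List.pyGet? cs nxt).elim false PySem.Chars.isdigit

-- ===== PORT B =====
def is_numeric_comma_py_alt (text : String) (index : Int) : Bool :=
  if index < 0 then false
  else
    let cs := text.toList
    let left := PySem.Chars.rstrip (PySem.List.slice cs none (some index))
    let right := PySem.Chars.lstrip (PySem.List.slice cs (some (index + 1)) none)
    !left.isEmpty && !right.isEmpty &&
      (PySem.List.pyGet? left (-1)).elim false PySem.Chars.isdigit &&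
      (PySem.List.pyGet? right 0).elim false PySem.Chars.isdigit

-- ===== PRECONDITION & SPEC =====
-- A raises IndexError when index - 1 ≥ len(text) (first loop) or index + 1 < -len(text)
-- (second loop, negative-index wraparound); Pre_ excludes exactly those inputs.
def Pre_is_numeric_comma_py (text : String) (index : Int) : Prop :=
  -((text.toList.length : Int) + 1) ≤ index ∧ index ≤ (text.toList.length : Int)
instance (text : String) (index : Int) : Decidable (Pre_is_numeric_comma_py text index) := by
  unfold Pre_is_numeric_comma_py; infer_instance

def pvWitness_is_numeric_comma_py : String × Int := ("1, 2", 1)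

def Spec_is_numeric_comma_py (text : String) (index : Int) (out : Bool) : Prop := out = is_numeric_comma_py_alt text index
instance (text : String) (index : Int) (out : Bool) : Decidable (Spec_is_numeric_comma_py text index out) := by unfold Spec_is_numeric_comma_py; infer_instance

-- ===== CLAIM (what is proved, stated in full; the proofs are below) =====
def Claim_equal_is_numeric_comma_py : Prop := ∀ (text : String) (index : Int), Dom_is_numeric_comma_py text index → Pre_is_numeric_comma_py text index → Spec_is_numeric_comma_py text index (is_numeric_comma_py text index)

-- ===== LEMMAS AND PROOFS =====

theorem rstrip_prefix (l : List Char) : PySem.Chars.rstrip l <+: l := by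
  unfold PySem.Chars.rstrip
  have h := List.dropWhile_suffix (l := l.reverse) (p := PySem.Chars.isspace)
  have := List.reverse_prefix.mpr h
  simpa using this

theorem lstrip_suffix (l : List Char) : PySem.Chars.lstrip l <:+ l :=
  List.dropWhile_suffix _

theorem pyGet?_prefix_last (cs r : List Char) (hp : r <+: cs) (hne : r ≠ []) :
    PySem.List.pyGet? cs ((r.length : Int) - 1) = r.getLast? := by
  have h1 : 0 < r.length := List.length_pos_of_ne_nil hne
  have hcast : ((r.length : Int) - 1) = ((r.length - 1 : Nat) : Int) := by omega
  rw [hcast, PySem.List.pyGet?_natCast]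
  obtain ⟨t, rfl⟩ := hp
  rw [List.getElem?_append_left (by omega), List.getLast?_eq_getElem?]

theorem pyGet?_suffix_head (cs q : List Char) (hs : q <:+ cs) (hne : q ≠ []) :
    PySem.List.pyGet? cs ((cs.length : Int) - (q.length : Int)) = q.head? := by
  obtain ⟨pre, rfl⟩ := hs
  obtain ⟨y, ys, rfl⟩ := List.exists_cons_of_ne_nil hne
  have h : ((pre ++ y :: ys).length : Int) - ((y :: ys).length : Int) = (pre.length : Int) := by
    simp
  rw [h, PySem.List.pyGet?_append_length]
  simp

theorem rstrip_append_space (l : List Char) (c : Char) (hc : PySem.Chars.isspace c = true) :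
    PySem.Chars.rstrip (l ++ [c]) = PySem.Chars.rstrip l := by
  unfold PySem.Chars.rstrip
  rw [List.reverse_append]
  simp [hc]

theorem rstrip_append_nonspace (l : List Char) (c : Char) (hc : ¬ PySem.Chars.isspace c = true) :
    PySem.Chars.rstrip (l ++ [c]) = l ++ [c] := by
  unfold PySem.Chars.rstrip
  rw [List.reverse_append]
  simp [hc]

theorem aScanPrev_eq (cs : List Char) (n : Nat) (hn : n ≤ cs.length) :
    aScanPrev cs ((n : Int) - 1) = ((PySem.Chars.rstrip (cs.take n)).length : Int) - 1 := by
  induction n with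
  | zero =>
    rw [aScanPrev]
    rw [dif_neg (by intro h; omega)]
    simp [PySem.Chars.rstrip]
  | succ m ih =>
    have hm : m < cs.length := by omega
    have htake : cs.take (m + 1) = cs.take m ++ [cs[m]] := by
      rw [List.take_add_one]; simp [List.getElem?_eq_getElem hm]
    rw [show ((m+1:Nat):Int) - 1 = ((m:Nat):Int) from by push_cast; omega]
    rw [aScanPrev]
    have hget : PySem.List.pyGet? cs ((m : Nat) : Int) = some cs[m] := by
      rw [PySem.List.pyGet?_natCast, List.getElem?_eq_getElem hm]
    by_cases hc : PySem.Chars.isspace cs[m] = true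
    · rw [dif_pos ⟨by positivity, by rw [hget]; simpa⟩]
      rw [ih (by omega), htake, rstrip_append_space _ _ hc]
    · rw [dif_neg (by rintro ⟨-, h2⟩; rw [hget] at h2; exact hc (by simpa using h2))]
      rw [htake, rstrip_append_nonspace _ _ hc]
      simp
      omega


theorem aScanNext_eq (cs : List Char) (n : Nat) (hn : n ≤ cs.length) :
    aScanNext cs (n : Int) = (cs.length : Int) - ((PySem.Chars.lstrip (cs.drop n)).length : Int) := by
  have key : ∀ (k n : Nat), n ≤ cs.length → cs.length - n = k →
      aScanNext cs (n : Int) = (cs.length : Int) - ((PySem.Chars.lstrip (cs.drop n)).length : Int) := by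
    intro k
    induction k with
    | zero =>
      intro n hn hk
      have he : n = cs.length := by omega
      subst he
      rw [aScanNext, dif_neg (by rintro ⟨h1, -⟩; omega)]
      simp [PySem.Chars.lstrip]
    | succ k ihk =>
      intro n hn hk
      have hm : n < cs.length := by omega
      have hget : PySem.List.pyGet? cs ((n : Nat) : Int) = some cs[n] := by
        rw [PySem.List.pyGet?_natCast, List.getElem?_eq_getElem hm]
      have hdrop : cs.drop n = cs[n] :: cs.drop (n + 1) := List.drop_eq_getElem_cons hm
      rw [aScanNext]
      by_cases hc : PySem.Chars.isspace cs[n] = true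
      · rw [dif_pos ⟨by exact_mod_cast hm, by rw [hget]; simpa⟩]
        rw [show ((n : Nat) : Int) + 1 = ((n + 1 : Nat) : Int) from by push_cast; ring]
        rw [ihk (n + 1) (by omega) (by omega)]
        have hl : PySem.Chars.lstrip (cs.drop n) = PySem.Chars.lstrip (cs.drop (n + 1)) := by
          rw [hdrop]
          unfold PySem.Chars.lstrip
          exact List.dropWhile_cons_of_pos hc
        rw [hl]
      · rw [dif_neg (by rintro ⟨-, h2⟩; rw [hget] at h2; exact hc (by simpa using h2))]
        rw [hdrop]
        unfold PySem.Chars.lstrip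
        rw [List.dropWhile_cons_of_neg (by simpa using hc)]
        simp
        omega
  exact key (cs.length - n) n hn rfl

-- ===== VERDICT (by name: the statement is the Claim_ definition above) =====
theorem is_numeric_comma_py_spec : Claim_equal_is_numeric_comma_py := by
  intro text index _ hpre
  unfold Pre_is_numeric_comma_py at hpre
  unfold Spec_is_numeric_comma_py is_numeric_comma_py is_numeric_comma_py_alt
  dsimp only
  by_cases hneg : index < 0
  · rw [if_pos hneg]
    rw [aScanPrev, dif_neg (by rintro ⟨h1, -⟩; omega)]
    have hfalse : decide (0 ≤ index - 1) = false := by simp; omega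
    rw [hfalse]
    simp
  · replace hneg : 0 ≤ index := by omega
    obtain ⟨n, rfl⟩ : ∃ n : Nat, index = (n : Int) := ⟨index.toNat, (Int.toNat_of_nonneg hneg).symm⟩
    rw [if_neg (by omega)]
    have hn : n ≤ text.toList.length := by exact_mod_cast hpre.2
    rw [show ((n : Nat) : Int) + 1 = ((n + 1 : Nat) : Int) from by push_cast; ring]
    rw [PySem.List.slice_to text.toList (by omega), PySem.List.slice_from text.toList (by omega)]
    simp only [Int.toNat_natCast]
    rw [aScanPrev_eq text.toList n hn]
    set r := PySem.Chars.rstrip (text.toList.take n) with hrdef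
    by_cases hlen : n = text.toList.length
    · -- index == len(text): the second loop exits at once and the right slice is empty
      rw [aScanNext, dif_neg (by rintro ⟨h1, -⟩; push_cast at h1; omega)]
      have hdrop : text.toList.drop (n + 1) = [] := by
        apply List.drop_eq_nil_of_le; omega
      rw [hdrop, show (decide (((n + 1 : Nat) : Int) < (text.toList.length : Int))) = false from by rw [decide_eq_false_iff_not]; omega]
      simp [PySem.Chars.lstrip]
    · have hn1 : n + 1 ≤ text.toList.length := by omega
      rw [aScanNext_eq text.toList (n + 1) hn1]
      set q := PySem.Chars.lstrip (text.toList.drop (n + 1)) with hqdef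
      by_cases hr : r = []
      · simp [hr]
      · by_cases hq : q = []
        · simp [hq]
        · have hrpos : 0 < r.length := List.length_pos_of_ne_nil hr
          have hqpos : 0 < q.length := List.length_pos_of_ne_nil hq
          have hrpre : r <+: text.toList :=
            (rstrip_prefix _).trans (List.take_prefix n text.toList)
          have hqsuf : q <:+ text.toList :=
            (lstrip_suffix _).trans (List.drop_suffix (n + 1) text.toList)
          rw [pyGet?_prefix_last _ _ hrpre hr, pyGet?_suffix_head _ _ hqsuf hq,
              PySem.List.pyGet?_neg_one, PySem.List.pyGet?_zero]
          have h1 : decide (0 ≤ (r.length : Int) - 1) = true := by simp; omega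
          have h2 : decide ((text.toList.length : Int) - (q.length : Int) < (text.toList.length : Int)) = true := by
            simp; omega
          have h3 : (!r.isEmpty) = true := by simp [hr]
          have h4 : (!q.isEmpty) = true := by simp [hq]
          rw [h1, h2, h3, h4, List.head?_eq_getElem?]
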